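-- pv_equiv track=rewrite | github.com/sookoothaii/HAK-GAL-Hexagonal | src_hexagonal/application/hallucination_prevention_service.py | _determine_predicate_type
-- ===== SOURCE A (Python) =====
-- def _determine_predicate_type(fact: str) -> str:
--     """
--     Bestimme den Prädikat-Typ eines Fakts
--
--     Returns:
--         Prädikat-Typ (HasProperty, ConsistsOf, Uses, etc.)
--     """
--     fact_stripped = fact.strip()
--
--     # Definiere bekannte Prädikate
--     predicate_patterns = [
--         ('HasProperty(', 'HasProperty'),
--         ('ConsistsOf(', 'ConsistsOf'),
--         ('Uses(', 'Uses'),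
--         ('IsTypeOf(', 'IsTypeOf'),
--         ('HasPart(', 'HasPart'),
--         ('HasPurpose(', 'HasPurpose'),
--         ('IsA(', 'IsA'),
--         ('Contains(', 'Contains'),
--         ('Requires(', 'Requires'),
--         ('Supports(', 'Supports'),
--         ('DependsOn(', 'DependsOn'),
--         ('PartOf(', 'PartOf'),
--         ('ConnectedTo(', 'ConnectedTo'),
--         ('HasFunction(', 'HasFunction'),
--         ('ComposedOf(', 'ComposedOf'),
--         ('ProducedBy(', 'ProducedBy'),
--         ('UsedBy(', 'UsedBy'),
--         ('LocatedIn(', 'LocatedIn'),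
--         ('RelatedTo(', 'RelatedTo')
--     ]
--
--     # Prüfe jeden bekannten Prädikat-Typ
--     for pattern, predicate_type in predicate_patterns:
--         if fact_stripped.startswith(pattern):
--             return predicate_type
--
--     # Versuche generisches Prädikat zu extrahieren
--     if '(' in fact_stripped:
--         predicate = fact_stripped.split('(')[0].strip()
--         if predicate:
--             return predicate
--
--     return "Other"
-- ===== SOURCE B (Python) =====
-- def _determine_predicate_type(fact: str) -> str:
--     # Single-pass direct extraction: no pattern table, no scan.
--     s = fact.strip()
--     i = s.find('(')
--     if i == -1:
--         return "Other"
--     pred = s[:i].strip()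
--     return pred if pred else "Other"
-- ===== Notes on version B (the rewrite author's own statement) =====
-- stated objective: simpler
-- what changed: B drops the 19-entry known-predicate table and its linear scan entirely: it just takes the substring before the first '(' of the stripped fact (or 'Other' if none/empty), which coincides with every table hit.
import Mathlib
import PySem

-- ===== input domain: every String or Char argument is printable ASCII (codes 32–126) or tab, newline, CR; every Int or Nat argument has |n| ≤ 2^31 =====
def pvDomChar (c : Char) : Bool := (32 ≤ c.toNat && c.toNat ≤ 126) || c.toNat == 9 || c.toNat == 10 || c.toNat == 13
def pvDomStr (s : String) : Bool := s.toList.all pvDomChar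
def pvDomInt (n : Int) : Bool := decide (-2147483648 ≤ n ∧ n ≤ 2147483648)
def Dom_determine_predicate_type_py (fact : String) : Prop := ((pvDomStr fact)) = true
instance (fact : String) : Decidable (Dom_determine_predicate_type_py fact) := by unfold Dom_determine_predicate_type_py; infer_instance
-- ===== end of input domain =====

-- B replaces A's 19-entry pattern table and scan by a direct "substring before the first '('" extraction (simpler; same value everywhere).

-- ===== PORT A =====
-- the predicate_patterns table, literally
def pvPatterns : List (String × String) :=
  [("HasProperty(", "HasProperty"), ("ConsistsOf(", "ConsistsOf"), ("Uses(", "Uses"),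
   ("IsTypeOf(", "IsTypeOf"), ("HasPart(", "HasPart"), ("HasPurpose(", "HasPurpose"),
   ("IsA(", "IsA"), ("Contains(", "Contains"), ("Requires(", "Requires"),
   ("Supports(", "Supports"), ("DependsOn(", "DependsOn"), ("PartOf(", "PartOf"),
   ("ConnectedTo(", "ConnectedTo"), ("HasFunction(", "HasFunction"), ("ComposedOf(", "ComposedOf"),
   ("ProducedBy(", "ProducedBy"), ("UsedBy(", "UsedBy"), ("LocatedIn(", "LocatedIn"),
   ("RelatedTo(", "RelatedTo")]

-- the 'for pattern, predicate_type in predicate_patterns: if fact_stripped.startswith(pattern): return predicate_type' loop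
def pvScan : List (String × String) → List Char → Option String
  | [], _ => none
  | (pat, ty) :: rest, s => if PySem.Chars.startswith s pat.toList then some ty else pvScan rest s

def determine_predicate_type_py (fact : String) : String :=
  let fs := PySem.Chars.strip fact.toList
  match pvScan pvPatterns fs with
  | some ty => ty
  | none =>
    if PySem.Chars.isIn ['('] fs then
      let pred := PySem.Chars.strip ((PySem.Chars.splitOn fs ['(']).headD [])
      if pred ≠ [] then String.ofList pred else "Other"
    else "Other"

-- ===== PORT B =====
-- the body of B after 's = fact.strip()' (find, slice, strip, empty test)
def determine_predicate_type_py_alt_core (s : List Char) : String :=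
  let i := PySem.Chars.find s ['(']
  if i = -1 then "Other"
  else
    let pred := PySem.Chars.strip (PySem.List.slice s none (some i))
    if pred = [] then "Other" else String.ofList pred

def determine_predicate_type_py_alt (fact : String) : String :=
  determine_predicate_type_py_alt_core (PySem.Chars.strip fact.toList)

-- ===== PRECONDITION & SPEC =====
def Spec_determine_predicate_type_py (fact : String) (out : String) : Prop := out = determine_predicate_type_py_alt fact
instance (fact : String) (out : String) : Decidable (Spec_determine_predicate_type_py fact out) := by unfold Spec_determine_predicate_type_py; infer_instance

-- ===== CLAIM (what is proved, stated in full; the proofs are below) =====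
def Claim_equal_determine_predicate_type_py : Prop := ∀ (fact : String), Dom_determine_predicate_type_py fact → Spec_determine_predicate_type_py fact (determine_predicate_type_py fact)

-- ===== LEMMAS AND PROOFS =====

-- find.go on the single-char needle '(' : the hit index, and -1 when absent
theorem pvFindGo_mem (l : List Char) (k : Nat) (h : '(' ∈ l) :
    PySem.Chars.find.go ['('] l k = ((k + (l.takeWhile (· ≠ '(')).length : Nat) : Int) := by
  induction l generalizing k with
  | nil => simp at h
  | cons c t ih =>
    rw [PySem.Chars.find.go]
    by_cases hc : c = '('
    · subst hc
      simp [List.isPrefixOf, List.takeWhile]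
    · have hc' : ¬ '(' = c := fun e => hc e.symm
      have ht : '(' ∈ t := by
        rcases List.mem_cons.mp h with e | m
        · exact absurd e hc'
        · exact m
      simp [List.isPrefixOf, hc', hc, List.takeWhile, ih (k+1) ht]
      omega

theorem pvFindGo_not_mem (l : List Char) (k : Nat) (h : '(' ∉ l) :
    PySem.Chars.find.go ['('] l k = -1 := by
  induction l generalizing k with
  | nil => rw [PySem.Chars.find.go]; simp
  | cons c t ih =>
    rw [PySem.Chars.find.go]
    have hc' : ¬ '(' = c := fun e => h (e ▸ List.mem_cons_self ..)
    simp [List.isPrefixOf, hc', ih (k+1) (fun ht => h (List.mem_cons_of_mem _ ht))]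

theorem pvTakeWhile_append (p r : List Char) (h : ∀ a ∈ p, a ≠ '(') :
    (p ++ '(' :: r).takeWhile (· ≠ '(') = p := by
  induction p with
  | nil => simp
  | cons a p ih =>
    have ha : ¬ a = '(' := h a (List.mem_cons_self ..)
    have hih := ih (fun x hx => h x (List.mem_cons_of_mem _ hx))
    simp only [ne_eq, decide_not] at hih
    simp only [List.cons_append, List.takeWhile_cons]
    simp [ha, hih]

theorem pvTake_takeWhile (l : List Char) :
    l.take (l.takeWhile (· ≠ '(')).length = l.takeWhile (· ≠ '(') := by
  exact (List.prefix_iff_eq_take.mp (List.takeWhile_prefix _)).symm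

-- splitOn.go: the first emitted piece is the takeWhile-prefix
theorem pvSplitGo (fuel : Nat) (l cur : List Char) (acc : List (List Char)) (hf : l.length < fuel) :
    ∃ rest, PySem.Chars.splitOn.go ['('] fuel l cur acc =
      acc.reverse ++ (cur.reverse ++ l.takeWhile (· ≠ '(')) :: rest := by
  induction fuel generalizing l cur acc with
  | zero => omega
  | succ n ih =>
    cases l with
    | nil =>
      refine ⟨[], ?_⟩
      simp [PySem.Chars.splitOn.go]
    | cons c t =>
      by_cases hc : c = '('
      · subst hc
        obtain ⟨rest, hr⟩ := ih t [] (cur.reverse :: acc) (by simp at hf ⊢; omega)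
        refine ⟨t.takeWhile (· ≠ '(') :: rest, ?_⟩
        simp [PySem.Chars.splitOn.go, List.isPrefixOf, hr]
      · have hc' : ¬ '(' = c := fun e => hc e.symm
        obtain ⟨rest, hr⟩ := ih t (c :: cur) acc (by simp at hf ⊢; omega)
        refine ⟨rest, ?_⟩
        simp [PySem.Chars.splitOn.go, List.isPrefixOf, hc', hc, hr]

theorem pvSplit_head (l : List Char) :
    (PySem.Chars.splitOn l ['(']).headD [] = l.takeWhile (· ≠ '(') := by
  obtain ⟨rest, hr⟩ := pvSplitGo (l.length + 1) l [] [] (by omega)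
  simp [PySem.Chars.splitOn, hr]

theorem pvScan_some (ps : List (String × String)) (l : List Char) (t : String)
    (h : pvScan ps l = some t) :
    ∃ p, (p, t) ∈ ps ∧ PySem.Chars.startswith l p.toList = true := by
  induction ps with
  | nil => simp [pvScan] at h
  | cons pt rest ih =>
    obtain ⟨pat, ty⟩ := pt
    rw [pvScan] at h
    by_cases hs : PySem.Chars.startswith l pat.toList = true
    · refine ⟨pat, ?_, hs⟩
      simp [hs] at h
      simp [h]
    · simp [hs] at h
      obtain ⟨p, hp, hsw⟩ := ih h
      exact ⟨p, List.mem_cons_of_mem _ hp, hsw⟩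

-- facts about each table entry, checked by evaluation
theorem pvPatterns_fact : ∀ pt ∈ pvPatterns,
    pt.1.toList = pt.2.toList ++ ['('] ∧ '(' ∉ pt.2.toList ∧
    PySem.Chars.strip pt.2.toList = pt.2.toList ∧ pt.2.toList ≠ [] := by
  decide

-- the value of PySem.Chars.find l ['('] in both cases
theorem pvFind_mem (l : List Char) (h : '(' ∈ l) :
    PySem.Chars.find l ['('] = (((l.takeWhile (· ≠ '(')).length : Nat) : Int) := by
  unfold PySem.Chars.find
  rw [pvFindGo_mem l 0 h]
  simp

theorem pvFind_not_mem (l : List Char) (h : '(' ∉ l) :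
    PySem.Chars.find l ['('] = -1 := pvFindGo_not_mem l 0 h

-- the generic-extraction branch of A equals B's find/slice computation when '(' occurs
theorem pvCore_eq (l : List Char) :
    (if PySem.Chars.isIn ['('] l then
      let pred := PySem.Chars.strip ((PySem.Chars.splitOn l ['(']).headD [])
      if pred ≠ [] then String.ofList pred else "Other"
     else "Other") =
    determine_predicate_type_py_alt_core l := by
  by_cases hmem : '(' ∈ l
  · have hfind := pvFind_mem l hmem
    have hne : PySem.Chars.find l ['('] ≠ -1 := by
      rw [hfind]; omega
    simp only [determine_predicate_type_py_alt_core]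
    rw [if_neg hne]
    have hisin : PySem.Chars.isIn ['('] l = true := by
      simp [PySem.Chars.isIn, hne]
    rw [if_pos hisin]
    rw [pvSplit_head, hfind, PySem.List.slice_to_natCast, pvTake_takeWhile]
    simp only [ne_eq, decide_not]
    by_cases hp : PySem.Chars.strip (l.takeWhile (fun x => !decide (x = '('))) = []
    · rw [if_neg (fun h => h hp), if_pos hp]
    · rw [if_pos hp, if_neg hp]
  · have hfind := pvFind_not_mem l hmem
    have hisin : PySem.Chars.isIn ['('] l = false := by
      simp [PySem.Chars.isIn, hfind]
    simp only [determine_predicate_type_py_alt_core]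
    rw [if_pos hfind, if_neg (by simp [hisin])]

-- ===== VERDICT (by name: the statement is the Claim_ definition above) =====
theorem determine_predicate_type_py_spec : Claim_equal_determine_predicate_type_py := by
  intro fact _
  unfold Spec_determine_predicate_type_py determine_predicate_type_py determine_predicate_type_py_alt
  cases hscan : pvScan pvPatterns (PySem.Chars.strip fact.toList) with
  | none => simp only [hscan]; exact pvCore_eq _
  | some ty =>
    simp only [hscan]
    obtain ⟨p, hpt, hsw⟩ := pvScan_some _ _ _ hscan
    obtain ⟨hp, hnp, hstrip, hnil⟩ := pvPatterns_fact (p, ty) hpt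
    have hpref : p.toList <+: PySem.Chars.strip fact.toList := by
      have := hsw
      simp only [PySem.Chars.startswith] at this
      exact List.isPrefixOf_iff_prefix.mp this
    obtain ⟨r, hr⟩ := hpref
    have hl : PySem.Chars.strip fact.toList = ty.toList ++ '(' :: r := by
      rw [← hr, hp, List.append_assoc]; rfl
    have hmem : '(' ∈ PySem.Chars.strip fact.toList := by
      rw [hl]; simp
    have htw : (PySem.Chars.strip fact.toList).takeWhile (· ≠ '(') = ty.toList := by
      rw [hl]; exact pvTakeWhile_append _ _ (fun a ha => fun e => hnp (e ▸ ha))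
    simp only [determine_predicate_type_py_alt_core]
    rw [if_neg (by rw [pvFind_mem _ hmem]; omega)]
    rw [pvFind_mem _ hmem, PySem.List.slice_to_natCast, pvTake_takeWhile, htw, hstrip,
        if_neg hnil]
    exact String.ofList_toList.symm
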